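-- pv_equiv track=rewrite | github.com/thereal1024/advent_of_code | 2020/17/solution.py | expand_state_3d
-- ===== SOURCE A (Python) =====
-- def balanced_read(state, dim, pos):
--     dx, dy, dz = dim
--     x, y, z = pos
--     return state[dz + z][dy + y][dx + x]
--
-- def expand_state_3d(state, steps):
--     height = len(state)
--     width = len(state[0])
--     assert all(len(row) == width for row in state)
--     if width % 2 == 0:
--         state = [row + '.' for row in state]
--         width += 1
--     if height % 2 == 0:
--         state.append('.' * width)
--         height += 1
--
--     assert height % 2 == 1
--     assert width % 2 == 1
--
--     ix, iy, iz = (width - 1) // 2, (height - 1) // 2, 0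
--     x, y, z = ix + steps, iy + steps, iz + steps
--     dim = x, y, z
--     idim = ix, iy, iz
--     xir, yir, zir = range(-ix, ix+1), range(-iy, iy+1), range(-iz, iz+1)
--     wstate = [state]
--     return dim, [[''.join(balanced_read(wstate, idim, (px, py, pz)) if
--                           ((px in xir) and (py in yir) and (pz in zir)) else '.'
--                      for px in range(-x, x+1)) for py in range(-y, y+1)] for pz in range(-z, z+1)]
-- ===== SOURCE B (Python) =====
-- def expand_state_3d(state, steps):
--     # same normalization preamble as the original (including the in-place
--     # append when width is odd and height is even)
--     height = len(state)
--     width = len(state[0])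
--     assert all(len(row) == width for row in state)
--     if width % 2 == 0:
--         state = [row + '.' for row in state]
--         width += 1
--     if height % 2 == 0:
--         state.append('.' * width)
--         height += 1
--     assert height % 2 == 1
--     assert width % 2 == 1
--     # build the grid by construction instead of per-cell comprehension reads
--     empty_row = '.' * (width + 2 * steps)
--     empty_layer = [empty_row] * (height + 2 * steps)
--     pad = '.' * steps
--     content_layer = ([empty_row] * steps
--                      + [pad + row + pad for row in state]
--                      + [empty_row] * steps)
--     dim = ((width - 1) // 2 + steps, (height - 1) // 2 + steps, steps)
--     layers = [content_layer if k == steps else empty_layer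
--               for k in range(2 * steps + 1)]
--     return dim, layers
-- ===== Notes on version B (the rewrite author's own statement) =====
-- stated objective: simpler
-- what changed: A fills the 3D grid cell by cell with a triple comprehension that calls balanced_read and a range-membership test per character; B keeps A's normalization preamble (including its in-place append) and then builds the padded rows and all-dot layers directly from string repetition and concatenation.
import Mathlib
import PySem

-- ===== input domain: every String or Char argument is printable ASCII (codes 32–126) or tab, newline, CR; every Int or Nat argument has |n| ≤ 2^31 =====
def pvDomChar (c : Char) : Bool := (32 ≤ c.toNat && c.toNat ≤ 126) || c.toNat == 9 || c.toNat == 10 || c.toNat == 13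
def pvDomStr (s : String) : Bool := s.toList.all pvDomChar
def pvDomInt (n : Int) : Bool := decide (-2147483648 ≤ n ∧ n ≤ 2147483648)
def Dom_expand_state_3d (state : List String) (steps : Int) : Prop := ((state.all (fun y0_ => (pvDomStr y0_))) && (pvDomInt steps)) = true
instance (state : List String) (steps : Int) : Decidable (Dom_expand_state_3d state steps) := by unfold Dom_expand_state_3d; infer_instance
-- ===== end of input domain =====

-- B replaces A's per-cell triple comprehension (one balanced_read per character) by direct
-- construction of the padded rows and layers from string/list building blocks (simpler; when
-- A pads an odd-width, even-height input it appends to the caller's list — B performs the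
-- same mutation; the proof is about the return value).


-- ===== PORT A =====
-- balanced_read returns the 1-character string state[dz+z][dy+y][dx+x]; ported as the Char
-- (''.join concatenates those characters). none = IndexError (never reached under Pre_).
def balanced_read (state : List (List String)) (dim : Int × Int × Int) (pos : Int × Int × Int) : Option Char :=
  match dim, pos with
  | (dx, dy, dz), (x, y, z) =>
    (PySem.List.pyGet? state (dz + z)).bind fun layer =>
      (PySem.List.pyGet? layer (dy + y)).bind fun row =>
        PySem.Str.pyGet? row (dx + x)

def expand_state_3d (state : List String) (steps : Int) : (Int × Int × Int) × List (List String) :=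
  let height : Int := PySem.List.len state
  -- state[0]: IndexError on [] — excluded by Pre_
  let width0 : Int := PySem.Str.len ((PySem.List.pyGet? state 0).getD "")
  -- assert all(len(row) == width for row in state): AssertionError excluded by Pre_
  let state1 := if PySem.Int.mod width0 2 = 0 then state.map (fun row => String.ofList (row.toList ++ ['.'])) else state
  let width := if PySem.Int.mod width0 2 = 0 then width0 + 1 else width0
  let state2 := if PySem.Int.mod height 2 = 0 then state1 ++ [String.ofList (List.replicate width.toNat '.')] else state1
  let height1 := if PySem.Int.mod height 2 = 0 then height + 1 else height
  -- the two parity asserts always hold here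
  let ix := PySem.Int.floordiv (width - 1) 2
  let iy := PySem.Int.floordiv (height1 - 1) 2
  let iz : Int := 0
  let x := ix + steps
  let y := iy + steps
  let z := iz + steps
  let wstate := [state2]
  ((x, y, z),
    (PySem.List.pyRange (-z) (z + 1) 1).map fun pz =>
      (PySem.List.pyRange (-y) (y + 1) 1).map fun py =>
        String.ofList ((PySem.List.pyRange (-x) (x + 1) 1).map fun px =>
          if px ∈ PySem.List.pyRange (-ix) (ix + 1) 1 ∧
             py ∈ PySem.List.pyRange (-iy) (iy + 1) 1 ∧
             pz ∈ PySem.List.pyRange (-iz) (iz + 1) 1 then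
            (balanced_read wstate (ix, iy, iz) (px, py, pz)).getD '.'
          else '.'))

-- ===== PORT B =====
def expand_state_3d_alt (state : List String) (steps : Int) : (Int × Int × Int) × List (List String) :=
  -- same normalization preamble as A (Source B keeps it verbatim)
  let height : Int := PySem.List.len state
  let width0 : Int := PySem.Str.len ((PySem.List.pyGet? state 0).getD "")
  let state1 := if PySem.Int.mod width0 2 = 0 then state.map (fun row => String.ofList (row.toList ++ ['.'])) else state
  let width := if PySem.Int.mod width0 2 = 0 then width0 + 1 else width0
  let state2 := if PySem.Int.mod height 2 = 0 then state1 ++ [String.ofList (List.replicate width.toNat '.')] else state1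
  let height1 := if PySem.Int.mod height 2 = 0 then height + 1 else height
  -- build the grid by construction ('.' * n is replicate; [row] * n is replicate)
  let emptyRow : String := String.ofList (List.replicate (width + 2 * steps).toNat '.')
  let emptyLayer : List String := List.replicate (height1 + 2 * steps).toNat emptyRow
  let pad : List Char := List.replicate steps.toNat '.'
  let contentLayer : List String :=
    List.replicate steps.toNat emptyRow
      ++ state2.map (fun row => String.ofList (pad ++ row.toList ++ pad))
      ++ List.replicate steps.toNat emptyRow
  let dim := (PySem.Int.floordiv (width - 1) 2 + steps, PySem.Int.floordiv (height1 - 1) 2 + steps, steps)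
  (dim, (PySem.List.pyRange 0 (2 * steps + 1) 1).map fun k => if k = steps then contentLayer else emptyLayer)

-- ===== PRECONDITION & SPEC =====
-- Pre_ excludes exactly where A raises: the empty list (IndexError on state[0]) and rows of
-- unequal length (the assert fails with AssertionError).
def Pre_expand_state_3d (state : List String) (steps : Int) : Prop :=
  state ≠ [] ∧ ∀ row ∈ state, row.toList.length = (state.headD "").toList.length
instance (state : List String) (steps : Int) : Decidable (Pre_expand_state_3d state steps) := by unfold Pre_expand_state_3d; infer_instance

def pvWitness_expand_state_3d : List String × Int := (["#..", ".#."], 1)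

def Spec_expand_state_3d (state : List String) (steps : Int) (out : (Int × Int × Int) × List (List String)) : Prop := out = expand_state_3d_alt state steps
instance (state : List String) (steps : Int) (out : (Int × Int × Int) × List (List String)) : Decidable (Spec_expand_state_3d state steps out) := by unfold Spec_expand_state_3d; infer_instance

-- ===== CLAIM (what is proved, stated in full; the proofs are below) =====
def Claim_equal_expand_state_3d : Prop := ∀ (state : List String) (steps : Int), Dom_expand_state_3d state steps → Pre_expand_state_3d state steps → Spec_expand_state_3d state steps (expand_state_3d state steps)

-- ===== LEMMAS AND PROOFS =====
-- helper: a row whose (py,pz) test already fails is all dots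
lemma rowA_dead (st : List String) (ix iy steps py pz : Int)
    (h : ¬ (-iy ≤ py ∧ py ≤ iy ∧ pz = 0)) :
    ((PySem.List.pyRange (-(ix + steps)) (ix + steps + 1) 1).map fun px =>
      if px ∈ PySem.List.pyRange (-ix) (ix + 1) 1 ∧
         py ∈ PySem.List.pyRange (-iy) (iy + 1) 1 ∧
         pz ∈ PySem.List.pyRange (-0) (0 + 1) 1 then
        (balanced_read [st] (ix, iy, 0) (px, py, pz)).getD '.'
      else '.') = List.replicate (ix + steps + 1 - -(ix + steps)).toNat '.' := by
  rw [List.map_congr_left (g := fun _ => '.')]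
  · rw [List.map_const', PySem.List.length_pyRange_one]
  · intro px _
    rw [if_neg]
    simp only [PySem.List.mem_pyRange_one]
    rintro ⟨-, ⟨hpy1, hpy2⟩, hpz1, hpz2⟩
    exact h ⟨hpy1, by omega, by omega⟩

lemma rowA_live (st : List String) (ix iy steps : Int) (t : Nat)
    (hs : 0 ≤ steps)
    (ht : t < st.length) (hlen : (st.length : Int) = 2 * iy + 1)
    (hrow : (st[t].toList.length : Int) = 2 * ix + 1) :
    ((PySem.List.pyRange (-(ix + steps)) (ix + steps + 1) 1).map fun px =>
      if px ∈ PySem.List.pyRange (-ix) (ix + 1) 1 ∧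
         (-iy + (t : Int)) ∈ PySem.List.pyRange (-iy) (iy + 1) 1 ∧
         (0 : Int) ∈ PySem.List.pyRange (-0) (0 + 1) 1 then
        (balanced_read [st] (ix, iy, 0) (px, -iy + (t : Int), 0)).getD '.'
      else '.') =
    List.replicate steps.toNat '.' ++ st[t].toList ++ List.replicate steps.toNat '.' := by
  have hrow' : ((st[t].length : Nat) : Int) = 2 * ix + 1 := by
    rw [← String.length_toList]; exact hrow
  apply List.ext_getElem
  · simp [PySem.List.length_pyRange_one]; omega
  intro c hc1 hc2
  rw [List.getElem_map, PySem.List.getElem_pyRange_one]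
  have hclen : c < (ix + steps + 1 - -(ix + steps)).toNat := by
    simpa [PySem.List.length_pyRange_one] using hc1
  by_cases hlo : c < steps.toNat
  · rw [if_neg, List.getElem_append_left (by simp; omega),
        List.getElem_append_left (by simpa using hlo), List.getElem_replicate]
    simp only [PySem.List.mem_pyRange_one]
    rintro ⟨⟨hpx1, -⟩, -, -⟩
    omega
  · by_cases hhi : (c : Int) < steps + (2 * ix + 1)
    · -- the content region
      rw [if_pos, List.getElem_append_left (by simp; omega),
          List.getElem_append_right (by simp; omega)]
      · simp only [List.length_replicate]
        simp only [balanced_read]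
        rw [show (0 : Int) + 0 = ((0 : Nat) : Int) by norm_num, PySem.List.pyGet?_natCast]
        simp only [List.getElem?_cons_zero, Option.bind_some]
        rw [show iy + (-iy + (t : Int)) = ((t : Nat) : Int) by omega, PySem.List.pyGet?_natCast,
            List.getElem?_eq_getElem ht]
        simp only [Option.bind_some]
        rw [show ix + (-(ix + steps) + (c : Int)) = ((c - steps.toNat : Nat) : Int) by omega,
            PySem.Str.pyGet?_natCast, List.getElem?_eq_getElem (by omega)]
        rfl
      · simp only [PySem.List.mem_pyRange_one]
        refine ⟨⟨by omega, by omega⟩, ⟨by omega, by omega⟩, by omega, by omega⟩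
    · rw [if_neg, List.getElem_append_right (by simp; omega), List.getElem_replicate]
      simp only [PySem.List.mem_pyRange_one]
      rintro ⟨⟨-, hpx2⟩, -, -⟩
      omega
lemma grid_eq (st : List String) (steps ix iy W H : Int)
    (hix : 0 ≤ ix) (hiy : 0 ≤ iy) (hW : W = 2 * ix + 1) (hH : H = 2 * iy + 1)
    (hlen : (st.length : Int) = H)
    (hrow : ∀ row ∈ st, (row.toList.length : Int) = W) :
    ((PySem.List.pyRange (-(0 + steps)) (0 + steps + 1) 1).map fun pz =>
      (PySem.List.pyRange (-(iy + steps)) (iy + steps + 1) 1).map fun py =>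
        String.ofList ((PySem.List.pyRange (-(ix + steps)) (ix + steps + 1) 1).map fun px =>
          if px ∈ PySem.List.pyRange (-ix) (ix + 1) 1 ∧
             py ∈ PySem.List.pyRange (-iy) (iy + 1) 1 ∧
             pz ∈ PySem.List.pyRange (-0) (0 + 1) 1 then
            (balanced_read [st] (ix, iy, 0) (px, py, pz)).getD '.'
          else '.')) =
    ((PySem.List.pyRange 0 (2 * steps + 1) 1).map fun k =>
      if k = steps then
        List.replicate steps.toNat (String.ofList (List.replicate (W + 2 * steps).toNat '.'))
          ++ st.map (fun row => String.ofList (List.replicate steps.toNat '.' ++ row.toList ++ List.replicate steps.toNat '.'))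
          ++ List.replicate steps.toNat (String.ofList (List.replicate (W + 2 * steps).toNat '.'))
      else List.replicate (H + 2 * steps).toNat (String.ofList (List.replicate (W + 2 * steps).toNat '.'))) := by
  subst hW hH
  apply List.ext_getElem
  · simp [PySem.List.length_pyRange_one]; omega
  intro k hk1 hk2
  have hk : (k : Int) < 2 * steps + 1 ∧ 0 ≤ steps := by
    simp [PySem.List.length_pyRange_one] at hk1; omega
  have hs : 0 ≤ steps := hk.2
  rw [List.getElem_map, List.getElem_map, PySem.List.getElem_pyRange_one,
      PySem.List.getElem_pyRange_one]
  have hwn : (ix + steps + 1 - -(ix + steps)).toNat = (2 * ix + 1 + 2 * steps).toNat := by omega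
  by_cases hks : (0 : Int) + (k : Int) = steps
  · rw [if_pos hks, show -(0 + steps) + (k : Int) = 0 by omega]
    apply List.ext_getElem
    · simp [PySem.List.length_pyRange_one]; omega
    intro j hj1 hj2
    rw [List.getElem_map, PySem.List.getElem_pyRange_one]
    have hjlen : j < (iy + steps + 1 - -(iy + steps)).toNat := by
      simpa [PySem.List.length_pyRange_one] using hj1
    by_cases hjlo : j < steps.toNat
    · rw [List.getElem_append_left (by simp; omega),
          List.getElem_append_left (by simpa using hjlo), List.getElem_replicate,
          rowA_dead st ix iy steps _ _ (by rintro ⟨h1, -, -⟩; omega), hwn]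
    · by_cases hjhi : (j : Int) < steps + st.length
      · rw [List.getElem_append_left (by simp; omega),
            List.getElem_append_right (by simp; omega), List.getElem_map]
        simp only [List.length_replicate]
        rw [show -(iy + steps) + (j : Int) = -iy + ((j - steps.toNat : Nat) : Int) by omega]
        exact congrArg String.ofList
          (rowA_live st ix iy steps (j - steps.toNat) hs (by omega) hlen
            (hrow _ (List.getElem_mem _)))
      · rw [List.getElem_append_right (by simp; omega), List.getElem_replicate,
            rowA_dead st ix iy steps _ _ (by rintro ⟨-, h2, -⟩; omega), hwn]
  · rw [if_neg hks]
    apply List.ext_getElem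
    · simp [PySem.List.length_pyRange_one]; omega
    intro j hj1 hj2
    rw [List.getElem_map, PySem.List.getElem_pyRange_one, List.getElem_replicate,
        rowA_dead st ix iy steps _ _ (by rintro ⟨-, -, h3⟩; omega), hwn]
-- ===== VERDICT (by name: the statement is the Claim_ definition above) =====
theorem expand_state_3d_spec : Claim_equal_expand_state_3d := by
  intro state steps _ hpre
  obtain ⟨hne, hrows⟩ := hpre
  obtain ⟨s0, rest, rfl⟩ := List.exists_cons_of_ne_nil hne
  have hrows' : ∀ row ∈ s0 :: rest, (row.toList.length : Int) = (s0.toList.length : Int) := by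
    intro row h
    exact_mod_cast congrArg Nat.cast (hrows row h)
  unfold Spec_expand_state_3d expand_state_3d expand_state_3d_alt
  simp only [PySem.List.pyGet?_zero_cons, Option.getD_some, PySem.Str.len_eq, PySem.List.len_eq,
    PySem.Int.mod_eq_emod_of_pos (show (0:Int) < 2 by norm_num),
    PySem.Int.floordiv_eq_ediv_of_pos (show (0:Int) < 2 by norm_num)]
  split_ifs with hw hh hh
  · -- width even, height even
    refine congrArg₂ Prod.mk (by simp) ?_
    refine grid_eq _ steps _ _ ((s0.toList.length : Int) + 1) (((s0 :: rest).length : Int) + 1)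
      (by omega) (by omega) (by omega) (by omega) (by simp) ?_
    intro row hmem
    simp only [List.mem_append, List.mem_map, List.mem_singleton] at hmem
    rcases hmem with ⟨r, hr, rfl⟩ | rfl
    · have := hrows' r hr; simp at this ⊢; omega
    · simp
  · -- width even, height odd
    refine congrArg₂ Prod.mk (by simp) ?_
    refine grid_eq _ steps _ _ ((s0.toList.length : Int) + 1) (((s0 :: rest).length : Int))
      (by omega) (by omega) (by omega) (by omega) (by simp) ?_
    intro row hmem
    simp only [List.mem_map] at hmem
    obtain ⟨r, hr, rfl⟩ := hmem
    have := hrows' r hr; simp at this ⊢; omega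
  · -- width odd, height even
    refine congrArg₂ Prod.mk (by simp) ?_
    refine grid_eq _ steps _ _ ((s0.toList.length : Int)) (((s0 :: rest).length : Int) + 1)
      (by omega) (by omega) (by omega) (by omega) (by simp) ?_
    intro row hmem
    simp only [List.mem_append, List.mem_singleton] at hmem
    rcases hmem with hr | rfl
    · exact hrows' row hr
    · simp
  · -- width odd, height odd
    refine congrArg₂ Prod.mk (by simp) ?_
    refine grid_eq _ steps _ _ ((s0.toList.length : Int)) (((s0 :: rest).length : Int))
      (by omega) (by omega) (by omega) (by omega) rfl hrows'
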